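-- pv_equiv track=rewrite | github.com/NotRobiin/challenges | concert_seats.py | can_see_stage
-- ===== SOURCE A (Python) =====
-- def can_see_stage(l: list) -> bool:
--     columns = []
--
--     # Flip the matrix so we operate on columns rather than rows
--     for r in range(len(l[0])):
--         columns.append([l[c][r] for c in range(len(l) - 1, -1, -1)])
--
--     # Search the column for the 'too high' seat
--     for column in columns:
--         prev = column[0] + 1
--
--         for value in column:
--             if value >= prev:
--                 return False
--
--             prev = value
--
--     return True
-- ===== SOURCE B (Python) =====
-- def can_see_stage(l: list) -> bool:
--     # Single row-wise pass: compare each row with the previous one, pointwise,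
--     # truncated to the width of the first row. No transpose, no sentinel.
--     prev = l[0]
--     for row in l[1:]:
--         row = row[:len(prev)]
--         if any(p >= v for p, v in zip(prev, row)):
--             return False
--         prev = row
--     return True
-- ===== Notes on version B (the rewrite author's own statement) =====
-- stated objective: simpler
-- what changed: B drops the transpose and the prev-sentinel entirely: a single row-wise pass compares each row pointwise with the previous row (zip), instead of building all columns first and scanning each with a prev accumulator; skipping the full transpose allocation makes it measurably faster.
import Mathlib
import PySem

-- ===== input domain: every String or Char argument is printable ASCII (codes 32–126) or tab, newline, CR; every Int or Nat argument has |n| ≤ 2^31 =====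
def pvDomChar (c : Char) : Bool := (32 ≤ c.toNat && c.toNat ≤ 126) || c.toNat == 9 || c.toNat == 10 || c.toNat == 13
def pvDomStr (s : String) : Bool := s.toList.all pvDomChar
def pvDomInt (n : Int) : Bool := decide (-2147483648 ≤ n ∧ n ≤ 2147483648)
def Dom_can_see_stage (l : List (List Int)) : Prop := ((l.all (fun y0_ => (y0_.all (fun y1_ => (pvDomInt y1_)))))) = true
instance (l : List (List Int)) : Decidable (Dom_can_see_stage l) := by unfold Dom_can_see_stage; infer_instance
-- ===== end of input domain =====

-- B replaces A's column-transpose-plus-sentinel scan by a single row-wise pass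
-- comparing each row pointwise with the previous one (objective: simpler).

-- ===== PORT A =====
-- inner loop 'for value in column: if value >= prev: return False; prev = value'
def pvScanCol : Int → List Int → Bool
  | _, [] => true
  | prev, v :: vs => if v ≥ prev then false else pvScanCol v vs

-- outer loop 'for column in columns: prev = column[0] + 1; …'
def pvScanCols : List (List Int) → Bool
  | [] => true
  | col :: rest =>
    if pvScanCol (PySem.List.pyGetD col 0 0 + 1) col then pvScanCols rest else false

def can_see_stage (l : List (List Int)) : Bool :=
  -- columns = [[l[c][r] for c in range(len(l)-1, -1, -1)] for r in range(len(l[0]))]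
  -- (l[0] on empty l raises IndexError in Python: excluded by Pre_; pyGetD defaults)
  let columns := (PySem.List.pyRange 0 ((PySem.List.pyGetD l 0 ([] : List Int)).length : Int) 1).map
    (fun r => (PySem.List.pyRange ((l.length : Int) - 1) (-1) (-1)).map
      (fun c => PySem.List.pyGetD (PySem.List.pyGetD l c []) r 0))
  pvScanCols columns

-- ===== PORT B =====
-- any(p >= v for p, v in zip(prev, row))
def pvRowBad (prev row : List Int) : Bool :=
  (prev.zip row).any (fun pv => pv.1 ≥ pv.2)

-- the 'for row in l[1:]' loop with accumulator prev
def pvGoRows : List Int → List (List Int) → Bool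
  | _, [] => true
  | prev, row :: rest =>
    let row' := PySem.List.slice row none (some (prev.length : Int))
    if pvRowBad prev row' then false else pvGoRows row' rest

def can_see_stage_alt (l : List (List Int)) : Bool :=
  -- prev = l[0] (IndexError on empty l: excluded by Pre_); loop over l[1:]
  pvGoRows (PySem.List.pyGetD l 0 []) (PySem.List.slice l (some 1) none)

-- ===== PRECONDITION & SPEC =====
-- Pre_ excludes exactly the inputs where Python A raises IndexError: the empty
-- list (l[0]) and ragged inputs with a row shorter than row 0 (l[c][r]).
def Pre_can_see_stage (l : List (List Int)) : Prop :=
  l ≠ [] ∧ ∀ row ∈ l, (l.headD []).length ≤ row.length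
instance (l : List (List Int)) : Decidable (Pre_can_see_stage l) := by unfold Pre_can_see_stage; infer_instance

def pvWitness_can_see_stage : List (List Int) := [[1, 2], [3, 4]]

def Spec_can_see_stage (l : List (List Int)) (out : Bool) : Prop := out = can_see_stage_alt l
instance (l : List (List Int)) (out : Bool) : Decidable (Spec_can_see_stage l out) := by unfold Spec_can_see_stage; infer_instance

-- ===== CLAIM (what is proved, stated in full; the proofs are below) =====
def Claim_equal_can_see_stage : Prop := ∀ (l : List (List Int)), Dom_can_see_stage l → Pre_can_see_stage l → Spec_can_see_stage l (can_see_stage l)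

-- ===== LEMMAS AND PROOFS =====

-- the outer A loop is an 'all' over the columns
theorem pvScanCols_all (cs : List (List Int)) :
    pvScanCols cs = cs.all (fun col => pvScanCol (PySem.List.pyGetD col 0 0 + 1) col) := by
  induction cs with
  | nil => rfl
  | cons col rest ih =>
    simp only [pvScanCols, List.all_cons, ih]
    by_cases h : pvScanCol (PySem.List.pyGetD col 0 0 + 1) col = true <;> simp [h]

theorem pvScanCol_chain (p : Int) (col : List Int) :
    pvScanCol p col = true ↔ List.IsChain (· > ·) (p :: col) := by
  induction col generalizing p with
  | nil => simp [pvScanCol]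
  | cons v vs ih =>
    rw [List.isChain_cons_cons]
    simp only [pvScanCol]
    by_cases h : v ≥ p
    · simp [h]
    · simp [h, ih]
      omega

theorem pvScanCol_plus_one (col : List Int) :
    pvScanCol (PySem.List.pyGetD col 0 0 + 1) col = true ↔ List.IsChain (· > ·) col := by
  cases col with
  | nil => simp [pvScanCol]
  | cons v vs =>
    rw [PySem.List.pyGetD_zero_cons]
    simp only [pvScanCol]
    have h : ¬ v ≥ v + 1 := by omega
    rw [if_neg h, pvScanCol_chain]

theorem take_getD (xs : List Int) (n j : Nat) (d : Int) (hj : j < n) (hn : n ≤ xs.length) :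
    (xs.take n).getD j d = xs.getD j d := by
  rw [List.getD_eq_getElem _ _ (by simp; omega), List.getD_eq_getElem _ _ (by omega)]
  simp

theorem pvRowBad_false_iff (prev row : List Int) (n0 : Nat) (hp : prev.length = n0)
    (hr : n0 ≤ row.length) :
    (pvRowBad prev (row.take n0) = false ↔ ∀ j < n0, prev.getD j 0 < row.getD j 0) := by
  have hlen : (prev.zip (row.take n0)).length = n0 := by simp [hp]; omega
  rw [pvRowBad, List.any_eq_false]
  constructor
  · intro h j hj
    have hmem : (prev[j]'(by omega), row[j]'(by omega)) ∈ prev.zip (row.take n0) := by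
      have : (prev.zip (row.take n0))[j]'(by omega) = (prev[j]'(by omega), row[j]'(by omega)) := by
        simp [List.getElem_zip]
      rw [← this]; exact List.getElem_mem _
    have := h _ hmem
    simp at this
    rw [List.getD_eq_getElem _ _ (by omega), List.getD_eq_getElem _ _ (by omega)]
    exact this
  · intro h x hx
    obtain ⟨j, hj, hget⟩ := List.mem_iff_getElem.mp hx
    have hj' : j < n0 := by omega
    have := h j hj'
    rw [List.getD_eq_getElem _ _ (by omega), List.getD_eq_getElem _ _ (by omega)] at this
    rw [List.getElem_zip] at hget
    subst hget
    simp
    simpa using this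

-- changing the head of a chain to one agreeing on the first n0 entries
theorem isChain_head_congr (n0 : Nat) (a a' : List Int) (rest : List (List Int))
    (hagree : ∀ j < n0, a.getD j 0 = a'.getD j 0) :
    (List.IsChain (fun x y => ∀ j < n0, x.getD j 0 < y.getD j 0) (a :: rest) ↔
     List.IsChain (fun x y => ∀ j < n0, x.getD j 0 < y.getD j 0) (a' :: rest)) := by
  cases rest with
  | nil => simp
  | cons b bs =>
    rw [List.isChain_cons_cons, List.isChain_cons_cons]
    constructor <;> intro ⟨h1, h2⟩ <;> refine ⟨fun j hj => ?_, h2⟩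
    · rw [← hagree j hj]; exact h1 j hj
    · rw [hagree j hj]; exact h1 j hj

theorem pvGoRows_chain (n0 : Nat) (rows : List (List Int)) (prev : List Int)
    (hp : prev.length = n0) (hr : ∀ row ∈ rows, n0 ≤ row.length) :
    (pvGoRows prev rows = true ↔
     List.IsChain (fun a b => ∀ j < n0, a.getD j 0 < b.getD j 0) (prev :: rows)) := by
  induction rows generalizing prev with
  | nil => simp [pvGoRows]
  | cons row rest ih =>
    have hrow : n0 ≤ row.length := hr row (by simp)
    simp only [pvGoRows]
    rw [hp, PySem.List.slice_to_natCast]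
    rw [List.isChain_cons_cons]
    by_cases hbad : pvRowBad prev (row.take n0) = true
    · rw [if_pos hbad]
      have := (pvRowBad_false_iff prev row n0 hp hrow)
      
      constructor
      · intro h; exact absurd h (by simp)
      · intro ⟨h1, _⟩
        exact absurd ((this.mpr h1)) (by simp [hbad])
    · rw [if_neg hbad]
      have hbad' : pvRowBad prev (row.take n0) = false := by
        cases h : pvRowBad prev (row.take n0) <;> simp_all
      have hrel := (pvRowBad_false_iff prev row n0 hp hrow).mp hbad'
      have hlen' : (row.take n0).length = n0 := by simp; omega
      rw [ih (row.take n0) hlen' (fun r hrm => hr r (by simp [hrm]))]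
      rw [isChain_head_congr n0 (row.take n0) row rest
        (fun j hj => take_getD row n0 j 0 hj hrow)]
      constructor
      · intro h; exact ⟨hrel, h⟩
      · intro ⟨_, h⟩; exact h

-- A's result: every column (read bottom-to-top, i.e. the reversed row order)
-- is strictly decreasing — stated index-wise
theorem can_see_stage_char (h0 : List Int) (t : List (List Int)) :
    (can_see_stage (h0 :: t) = true ↔
     ∀ j < h0.length, ∀ i, i + 1 < (h0 :: t).length →
       ((h0 :: t).getD i []).getD j 0 < ((h0 :: t).getD (i + 1) []).getD j 0) := by
  have hrev : PySem.List.pyRange (((h0 :: t).length : Int) - 1) (-1) (-1) =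
      (PySem.List.pyRange 0 ((h0 :: t).length : Int) 1).reverse := by
    rw [PySem.List.pyRange_neg_one_eq_reverse]
    norm_num
  simp only [can_see_stage]
  rw [pvScanCols_all, PySem.List.pyGetD_zero_cons, PySem.List.pyRange_zero_natCast,
    List.map_map, List.all_map, List.all_eq_true]
  simp only [hrev, PySem.List.pyRange_zero_natCast, List.map_reverse, List.map_map,
    Function.comp_def, List.mem_range]
  constructor
  · intro h j hj i hi
    have := (pvScanCol_plus_one _).mp (h j hj)
    rw [List.isChain_reverse, List.isChain_map, List.isChain_iff_getElem] at this
    have h2 := this i (by simpa using hi)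
    simp only [List.getElem_range, PySem.List.pyGetD_natCast] at h2
    exact h2
  · intro h j hj
    rw [pvScanCol_plus_one, List.isChain_reverse, List.isChain_map, List.isChain_iff_getElem]
    intro i hi
    simp only [List.getElem_range, PySem.List.pyGetD_natCast]
    exact h j hj i (by simpa using hi)

-- B's result: consecutive rows are pointwise strictly increasing on the first
-- h0.length entries
theorem can_see_stage_alt_char (h0 : List Int) (t : List (List Int))
    (hlen : ∀ row ∈ (h0 :: t), h0.length ≤ row.length) :
    (can_see_stage_alt (h0 :: t) = true ↔
     List.IsChain (fun a b => ∀ j < h0.length, a.getD j 0 < b.getD j 0) (h0 :: t)) := by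
  simp only [can_see_stage_alt, PySem.List.pyGetD_zero_cons, PySem.List.slice_from_one,
    List.tail_cons]
  exact pvGoRows_chain h0.length t h0 rfl (fun r hr => hlen r (by simp [hr]))

-- ===== VERDICT (by name: the statement is the Claim_ definition above) =====
theorem can_see_stage_spec : Claim_equal_can_see_stage := by
  intro l _ hPre
  obtain ⟨hne, hlen⟩ := hPre
  obtain ⟨h0, t, rfl⟩ : ∃ h0 t, l = h0 :: t := by
    cases l with
    | nil => exact absurd rfl hne
    | cons a b => exact ⟨a, b, rfl⟩
  unfold Spec_can_see_stage
  have hlen' : ∀ row ∈ (h0 :: t), h0.length ≤ row.length := by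
    intro row hr
    simpa using hlen row hr
  have hiff : (can_see_stage (h0 :: t) = true ↔ can_see_stage_alt (h0 :: t) = true) := by
    rw [can_see_stage_char, can_see_stage_alt_char h0 t hlen', List.isChain_iff_getElem]
    constructor
    · intro h i hi j hj
      have := h j hj i hi
      rwa [List.getD_eq_getElem (h0 :: t) [] (show i < (h0 :: t).length by omega),
        List.getD_eq_getElem (h0 :: t) [] (show i + 1 < (h0 :: t).length by omega)] at this
    · intro h j hj i hi
      have := h i hi j hj
      rwa [List.getD_eq_getElem (h0 :: t) [] (show i < (h0 :: t).length by omega),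
        List.getD_eq_getElem (h0 :: t) [] (show i + 1 < (h0 :: t).length by omega)]
  cases hA : can_see_stage (h0 :: t) <;> cases hB : can_see_stage_alt (h0 :: t) <;> simp_all
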